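-- pv_equiv track=rewrite | github.com/gkukrety81/rah | backend/app/ai.py | _selected_texts
-- ===== SOURCE A (Python) =====
-- from typing import List, Dict, Any
--
-- def _selected_texts(
--         questions: List[Dict[str, Any]], selected_ids: List[str]
-- ) -> Dict[str, List[str]]:
--     by_group: Dict[str, List[str]] = {
--         "Physical": [],
--         "Psychological/Emotional": [],
--         "Functional": [],
--     }
--     sel = set(selected_ids or [])
--     for q in questions or []:
--         try:
--             if q.get("id") in sel:
--                 grp = q.get("group") or "Physical"
--                 by_group.setdefault(grp, []).append(str(q.get("text", "")).strip())
--         except Exception: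
--             continue
--
--     # de-dupe while preserving order
--     for k, arr in by_group.items():
--         seen = set()
--         dedup = []
--         for s in arr:
--             if s and s not in seen:
--                 seen.add(s)
--                 dedup.append(s)
--         by_group[k] = dedup
--     return by_group
-- ===== SOURCE B (Python) =====
-- from typing import List, Dict, Any
--
-- def _selected_texts(
--         questions: List[Dict[str, Any]], selected_ids: List[str]
-- ) -> Dict[str, List[str]]:
--     sel = set(selected_ids or [])
--     # stage 1: flatten the selection into an ordered list of (group, text) pairs
--     pairs = []
--     for q in questions or []:
--         try:
--             if q.get("id") in sel:
--                 pairs.append((q.get("group") or "Physical",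
--                               str(q.get("text", "")).strip()))
--         except Exception:
--             continue
--     # stage 2: output key order = three base groups, then new groups by first appearance
--     keys = ["Physical", "Psychological/Emotional", "Functional"]
--     for g, _ in pairs:
--         if g not in keys:
--             keys.append(g)
--     # stage 3: per key, one filtered dedup scan over the flat pair list
--     out: Dict[str, List[str]] = {}
--     for k in keys:
--         seen = set()
--         dedup = []
--         for g, s in pairs:
--             if g == k and s and s not in seen:
--                 seen.add(s)
--                 dedup.append(s)
--         out[k] = dedup
--     return out
-- ===== Notes on version B (the rewrite author's own statement) =====
-- stated objective: alternative
-- what changed: B replaces A's dict-threaded loop plus per-key dedup pass with three staged passes over a flat list: it first flattens the selection into an ordered (group, text) pair list, then computes the output key order separately, then for each key runs one filtered dedup scan over the pair list, building the result dict only at the end.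
import Mathlib
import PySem

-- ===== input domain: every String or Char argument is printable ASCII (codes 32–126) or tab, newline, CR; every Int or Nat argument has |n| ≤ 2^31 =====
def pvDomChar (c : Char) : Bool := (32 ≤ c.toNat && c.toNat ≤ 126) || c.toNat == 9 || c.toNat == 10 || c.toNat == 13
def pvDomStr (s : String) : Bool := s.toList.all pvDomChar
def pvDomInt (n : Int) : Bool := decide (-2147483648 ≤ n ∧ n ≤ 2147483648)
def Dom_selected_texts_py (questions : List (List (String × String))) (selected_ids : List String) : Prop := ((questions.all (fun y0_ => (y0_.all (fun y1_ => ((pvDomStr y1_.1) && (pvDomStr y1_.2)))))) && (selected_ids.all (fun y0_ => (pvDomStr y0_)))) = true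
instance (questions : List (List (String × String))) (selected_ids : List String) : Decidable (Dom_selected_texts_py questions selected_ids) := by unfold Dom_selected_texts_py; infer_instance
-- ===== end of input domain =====

-- B restructures A into three staged passes: flatten the selection into an ordered (group, text)
-- pair list, compute the output key order, then run one filtered dedup scan per key — no dict is
-- threaded through the question loop (objective: alternative).


-- ===== PORT A =====
-- body of A's de-dupe inner loop ("if s and s not in seen"); state = (seen, dedup)
def pvDedupStep (st : PySem.Set String × List String) (s : String) : PySem.Set String × List String :=
  if s ≠ "" ∧ PySem.Set.contains st.1 s = false then (PySem.Set.add st.1 s, st.2 ++ [s]) else st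

-- body of A's first loop over one question q (the try/except body; no statement in it can raise on a typed input)
def pvStepA (sel : PySem.Set String) (d : PySem.Dict String (List String)) (q : List (String × String)) :
    PySem.Dict String (List String) :=
  let qd := PySem.Dict.mk q
  match qd.get? "id" with
  | some i =>
    if PySem.Set.contains sel i then
      let grp := if qd.getD "group" "" = "" then "Physical" else qd.getD "group" ""
      let s := PySem.Str.strip (qd.getD "text" "")
      -- by_group.setdefault(grp, []).append(s)  ≡  by_group[grp] = by_group.get(grp, []) + [s]
      PySem.Dict.modify d grp [] (fun arr => arr ++ [s])
    else d
  | none => d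

def selected_texts_py (questions : List (List (String × String))) (selected_ids : List String) : List (String × List String) :=
  let sel : PySem.Set String := PySem.Set.ofList selected_ids
  let byGroup := questions.foldl (pvStepA sel)
      (PySem.Dict.mk [("Physical", []), ("Psychological/Emotional", []), ("Functional", [])])
  -- second pass: by_group[k] = dedup(arr) for each key in order (keys are unique, so the
  -- reassigning for-loop over items() is a map over the items list)
  byGroup.items.map (fun p => (p.1, (p.2.foldl pvDedupStep (PySem.Set.empty, [])).2))

-- ===== PORT B =====
-- stage 1 body: append the (group, text) pair of a selected question (the try/except body cannot raise on a typed input)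
def pvCollect (sel : PySem.Set String) (acc : List (String × String)) (q : List (String × String)) :
    List (String × String) :=
  let qd := PySem.Dict.mk q
  match qd.get? "id" with
  | some i =>
    if PySem.Set.contains sel i then
      acc ++ [((if qd.getD "group" "" = "" then "Physical" else qd.getD "group" ""),
               PySem.Str.strip (qd.getD "text" ""))]
    else acc
  | none => acc

-- stage 2 body: "if g not in keys: keys.append(g)"
def pvKeysStep (ks : List String) (p : String × String) : List String :=
  if p.1 ∈ ks then ks else ks ++ [p.1]

-- stage 3 inner-loop body for key k: "if g == k and s and s not in seen"
def pvGDStep (k : String) (st : PySem.Set String × List String) (p : String × String) :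
    PySem.Set String × List String :=
  if p.1 = k ∧ p.2 ≠ "" ∧ PySem.Set.contains st.1 p.2 = false
  then (PySem.Set.add st.1 p.2, st.2 ++ [p.2]) else st

def pvGroupDedup (pairs : List (String × String)) (k : String) : List String :=
  (pairs.foldl (pvGDStep k) (PySem.Set.empty, [])).2

def selected_texts_py_alt (questions : List (List (String × String))) (selected_ids : List String) : List (String × List String) :=
  let sel : PySem.Set String := PySem.Set.ofList selected_ids
  let pairs := questions.foldl (pvCollect sel) []
  let keys := pairs.foldl pvKeysStep ["Physical", "Psychological/Emotional", "Functional"]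
  -- building `out` by inserting fresh keys in order = this map over the final key list
  keys.map (fun k => (k, pvGroupDedup pairs k))

-- ===== PRECONDITION & SPEC =====
def Spec_selected_texts_py (questions : List (List (String × String))) (selected_ids : List String) (out : List (String × List String)) : Prop := out = selected_texts_py_alt questions selected_ids
instance (questions : List (List (String × String))) (selected_ids : List String) (out : List (String × List String)) : Decidable (Spec_selected_texts_py questions selected_ids out) := by unfold Spec_selected_texts_py; infer_instance

-- ===== CLAIM =====
def Claim_equal_selected_texts_py : Prop := ∀ (questions : List (List (String × String))) (selected_ids : List String), Dom_selected_texts_py questions selected_ids → Spec_selected_texts_py questions selected_ids (selected_texts_py questions selected_ids)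

-- ===== LEMMAS AND PROOFS =====

-- the single dict update A performs per selected question, expressed on the pair it extracts
def pvUpd (d : PySem.Dict String (List String)) (p : String × String) : PySem.Dict String (List String) :=
  PySem.Dict.modify d p.1 [] (fun arr => arr ++ [p.2])

-- texts of group k among the pairs, in order
def pvGrpTexts (pairs : List (String × String)) (k : String) : List String :=
  (pairs.filter (fun p => p.1 == k)).map Prod.snd

theorem pvCollect_acc (sel : PySem.Set String) (acc : List (String × String)) (q : List (String × String)) :
    pvCollect sel acc q = acc ++ pvCollect sel [] q := by
  unfold pvCollect
  cases hq : (PySem.Dict.mk q).get? "id" with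
  | none => simp only [hq]; simp
  | some i => simp only [hq]; split_ifs <;> simp

theorem pvFold_collect_acc (sel : PySem.Set String) :
    ∀ (qs : List (List (String × String))) (acc : List (String × String)),
      qs.foldl (pvCollect sel) acc = acc ++ qs.foldl (pvCollect sel) [] := by
  intro qs
  induction qs with
  | nil => intro acc; simp
  | cons q t ih =>
    intro acc
    simp only [List.foldl_cons]
    rw [pvCollect_acc, ih, ih (pvCollect sel [] q), List.append_assoc]

theorem pvStepA_eq_upds (sel : PySem.Set String) (d : PySem.Dict String (List String))
    (q : List (String × String)) :
    pvStepA sel d q = (pvCollect sel [] q).foldl pvUpd d := by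
  unfold pvStepA pvCollect
  cases hq : (PySem.Dict.mk q).get? "id" with
  | none => simp only [hq]; rfl
  | some i => simp only [hq]; split_ifs <;> simp [pvUpd]

theorem pvFoldA_eq_pairs (sel : PySem.Set String) :
    ∀ (qs : List (List (String × String))) (d : PySem.Dict String (List String)),
      qs.foldl (pvStepA sel) d = (qs.foldl (pvCollect sel) []).foldl pvUpd d := by
  intro qs
  induction qs with
  | nil => intro d; rfl
  | cons q t ih =>
    intro d
    simp only [List.foldl_cons]
    rw [pvStepA_eq_upds, ih, pvFold_collect_acc sel t (pvCollect sel [] q), List.foldl_append]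

theorem pvUpd_as_insert (d : PySem.Dict String (List String)) (p : String × String) :
    pvUpd d p = d.insert p.1 (d.getD p.1 [] ++ [p.2]) := rfl

theorem pvUpd_keys (d : PySem.Dict String (List String)) (p : String × String) :
    (pvUpd d p).keys = pvKeysStep d.keys p := by
  rw [pvUpd_as_insert, pvKeysStep]
  by_cases h : p.1 ∈ d.keys
  · rw [if_pos h, PySem.Dict.keys_insert_of_contains]
    rw [PySem.Dict.contains_eq_decide_mem_keys]; simpa using h
  · rw [if_neg h, PySem.Dict.keys_insert_of_not_contains]
    rw [PySem.Dict.contains_eq_decide_mem_keys]; simpa using h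

theorem pvUpd_nodup (d : PySem.Dict String (List String)) (p : String × String)
    (h : d.keys.Nodup) : (pvUpd d p).keys.Nodup := by
  rw [pvUpd_as_insert]; exact PySem.Dict.nodup_keys_insert _ _ _ h

theorem pvUpd_getD (d : PySem.Dict String (List String)) (p : String × String) (k : String) :
    (pvUpd d p).getD k [] = if k = p.1 then d.getD p.1 [] ++ [p.2] else d.getD k [] := by
  rw [pvUpd_as_insert, PySem.Dict.getD_insert]

theorem pvGrpTexts_cons (p : String × String) (rest : List (String × String)) (k : String) :
    pvGrpTexts (p :: rest) k = (if p.1 = k then [p.2] else []) ++ pvGrpTexts rest k := by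
  unfold pvGrpTexts
  by_cases h : p.1 = k <;> simp [h]

-- main dict-shape invariant: A's dict after consuming the pairs, rendered as key list + per-key texts
theorem pvL1 : ∀ (pairs : List (String × String)) (d : PySem.Dict String (List String)),
    d.keys.Nodup →
    (pairs.foldl pvUpd d).items
      = (pairs.foldl pvKeysStep d.keys).map (fun k => (k, d.getD k [] ++ pvGrpTexts pairs k)) := by
  intro pairs
  induction pairs with
  | nil =>
    intro d h
    simp only [List.foldl_nil]
    rw [PySem.Dict.items_eq_map_keys d h []]
    apply List.map_congr_left
    intro k _
    simp [pvGrpTexts]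
  | cons p rest ih =>
    intro d h
    simp only [List.foldl_cons]
    rw [ih (pvUpd d p) (pvUpd_nodup d p h), pvUpd_keys]
    apply List.map_congr_left
    intro k _
    rw [pvUpd_getD, pvGrpTexts_cons]
    by_cases hk : k = p.1
    · subst hk; simp [List.append_assoc]
    · have : ¬ p.1 = k := fun e => hk e.symm
      simp [hk, this]

-- per-key scan over the pairs = A's de-dupe scan over that key's texts
theorem pvL2 (k : String) : ∀ (pairs : List (String × String)) (st : PySem.Set String × List String),
    pairs.foldl (pvGDStep k) st = (pvGrpTexts pairs k).foldl pvDedupStep st := by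
  intro pairs
  induction pairs with
  | nil => intro st; rfl
  | cons p rest ih =>
    intro st
    rw [pvGrpTexts_cons, List.foldl_cons]
    by_cases h : p.1 = k
    · rw [if_pos h, List.singleton_append, List.foldl_cons, ih]
      congr 1
      simp [pvGDStep, pvDedupStep, h]
    · rw [if_neg h, List.nil_append, ih]
      congr 1
      simp [pvGDStep, h]

theorem pvGroupDedup_eq (pairs : List (String × String)) (k : String) :
    pvGroupDedup pairs k = ((pvGrpTexts pairs k).foldl pvDedupStep (PySem.Set.empty, [])).2 := by
  unfold pvGroupDedup; rw [pvL2]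

-- the initial dict: every key looks up to []
theorem pvInitGetD (k : String) :
    (PySem.Dict.mk [("Physical", ([] : List String)), ("Psychological/Emotional", []), ("Functional", [])]).getD k [] = [] := by
  simp only [PySem.Dict.getD, PySem.Dict.get?_mk_cons]
  split_ifs <;> simp [PySem.Dict.get?]

-- ===== VERDICT =====
theorem selected_texts_py_spec : Claim_equal_selected_texts_py := by
  unfold Claim_equal_selected_texts_py
  intro questions selected_ids _
  unfold Spec_selected_texts_py selected_texts_py selected_texts_py_alt
  set sel := PySem.Set.ofList selected_ids with hsel
  set D0 := PySem.Dict.mk [("Physical", ([] : List String)), ("Psychological/Emotional", []), ("Functional", [])] with hD0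
  set pairs := questions.foldl (pvCollect sel) [] with hpairs
  have hnd : D0.keys.Nodup := by rw [hD0]; decide
  have hkeys : D0.keys = ["Physical", "Psychological/Emotional", "Functional"] := by rw [hD0]; rfl
  show (questions.foldl (pvStepA sel) D0).items.map
      (fun p => (p.1, (p.2.foldl pvDedupStep (PySem.Set.empty, [])).2))
    = (pairs.foldl pvKeysStep ["Physical", "Psychological/Emotional", "Functional"]).map
      (fun k => (k, pvGroupDedup pairs k))
  rw [pvFoldA_eq_pairs, ← hpairs, pvL1 pairs D0 hnd, hkeys, List.map_map]
  apply List.map_congr_left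
  intro k _
  simp only [Function.comp]
  rw [pvGroupDedup_eq, pvInitGetD, List.nil_append]
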